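-- pv_equiv track=rewrite | github.com/HAPPY3N1GMA/ctf-tools | binary/papa_pwn/misc.py | xor_encode
-- ===== SOURCE A (Python) =====
-- def xor_encode(plain, avoid):
--     cipher = ""
--     decrypt_key = ""
--     # Encode each character
--     for char in plain:
--         plain = ord(char)
--         # Check the character actually needs encoding
--         if ((plain in avoid) or (0 in avoid)):
--             # Find character to encode with
--             found = False
--             for key in range(256):
--                 if ((key in avoid) or (plain ^ key in avoid)):
--                     continue
--                 cipher += chr(plain ^ key)
--                 decrypt_key += chr(key)
--                 found = True
--                 break
--
--             # Error if couldn't do conversion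
--             if (not found):
--                 log.failure("Couldn't XOR encode: " + char)
--                 exit(1)
--
--         # Otherwise just xor with null
--         else:
--             cipher += char
--             decrypt_key += "\x00"
--
--     return (cipher, decrypt_key)
-- ===== SOURCE B (Python) =====
-- # Precompute a 256-entry table (pass-through / chosen key / unencodable) once,
-- # then encode in a single pass with a table lookup per character.
-- def xor_encode(plain, avoid):
--     avoid_set = set(avoid)
--     zero = 0 in avoid_set
--     table = []
--     for v in range(256):
--         if v in avoid_set or zero:
--             key = None
--             for k in range(256):
--                 if k not in avoid_set and (v ^ k) not in avoid_set:
--                     key = k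
--                     break
--             table.append(('enc', key))
--         else:
--             table.append(('pass', None))
--     cipher = []
--     dkey = []
--     for char in plain:
--         kind, k = table[ord(char)]
--         if kind == 'pass':
--             cipher.append(char)
--             dkey.append('\x00')
--         elif k is None:
--             raise SystemExit(1)
--         else:
--             cipher.append(chr(ord(char) ^ k))
--             dkey.append(chr(k))
--     return (''.join(cipher), ''.join(dkey))
-- ===== Notes on version B (the rewrite author's own statement) =====
-- stated objective: alternative
-- what changed: B precomputes one 256-entry table (pass-through / chosen key / unencodable) from the avoid set, then encodes in a single pass with a table lookup per character, instead of A's per-character membership tests and per-character rescan of the 256 candidate keys.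
import Mathlib
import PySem

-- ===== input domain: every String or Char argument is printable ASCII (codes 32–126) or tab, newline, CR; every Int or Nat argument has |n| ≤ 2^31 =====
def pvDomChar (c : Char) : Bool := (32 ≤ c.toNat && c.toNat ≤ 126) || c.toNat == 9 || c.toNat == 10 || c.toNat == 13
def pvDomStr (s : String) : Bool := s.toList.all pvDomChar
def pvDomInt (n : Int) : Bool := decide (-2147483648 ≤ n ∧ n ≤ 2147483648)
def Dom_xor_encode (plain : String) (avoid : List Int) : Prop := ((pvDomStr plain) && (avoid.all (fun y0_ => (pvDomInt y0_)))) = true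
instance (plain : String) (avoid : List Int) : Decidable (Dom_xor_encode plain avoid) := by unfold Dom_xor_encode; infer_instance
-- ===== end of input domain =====

-- B replaces A's per-character membership tests and per-character rescan of the
-- 256 candidate keys by one precomputed 256-entry table and a single pass.

-- ===== PORT A =====
-- literal transliteration of A: fold over the characters, appending to the two
-- accumulator strings; the inner 'for key in range(256) … break' is the first
-- key the loop does not 'continue' past, i.e. find? over range(256).
def xor_encode (plain : String) (avoid : List Int) : String × String :=
  plain.toList.foldl (fun st char =>
    let p : Int := Int.ofNat char.toNat
    if avoid.contains p || avoid.contains 0 then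
      match (PySem.List.pyRange 0 256 1).find?
          (fun key => !(avoid.contains key || avoid.contains (Int.ofNat (p.toNat ^^^ key.toNat)))) with
      | some key => (st.1.push (Char.ofNat (p.toNat ^^^ key.toNat)), st.2.push (Char.ofNat key.toNat))
      | none => st      -- log.failure(...) + exit(1): A returns nothing here, excluded by Pre_
    else
      (st.1.push char, st.2.push (Char.ofNat 0)))
    ("", "")

-- ===== PORT B =====
-- transliteration of Source B: build the 256-entry table from the avoid set once,
-- then one pass over plain with an O(1) table lookup per character.
def xor_encode_alt (plain : String) (avoid : List Int) : String × String :=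
  let avoidS : PySem.Set Int := PySem.Set.ofList avoid
  let zero : Bool := PySem.Set.contains avoidS 0
  let table : List (Option (Option Nat)) := (List.range 256).map (fun v =>
    if PySem.Set.contains avoidS (Int.ofNat v) || zero then
      some ((List.range 256).find? (fun k =>
        !(PySem.Set.contains avoidS (Int.ofNat k)) && !(PySem.Set.contains avoidS (Int.ofNat (v ^^^ k)))))
    else none)
  let enc : List (Char × Char) := plain.toList.map (fun c =>
    match table.getD c.toNat none with
    | none => (c, Char.ofNat 0)
    | some none => (c, Char.ofNat 0)   -- Source B raises SystemExit(1) here; excluded by Pre_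
    | some (some k) => (Char.ofNat (c.toNat ^^^ k), Char.ofNat k))
  (String.ofList (enc.map Prod.fst), String.ofList (enc.map Prod.snd))

-- ===== PRECONDITION & SPEC =====
-- Pre_ excludes exactly the inputs on which A reaches exit(1): some character
-- needs encoding but no key in 0..255 keeps both bytes out of avoid.
def Pre_xor_encode (plain : String) (avoid : List Int) : Prop :=
  (plain.toList.all (fun c =>
    !(avoid.contains ((c.toNat : Int)) || avoid.contains 0) ||
    (List.range 256).any (fun k =>
      !(avoid.contains ((k : Int))) && !(avoid.contains ((↑(c.toNat ^^^ k) : Int)))))) = true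
instance (plain : String) (avoid : List Int) : Decidable (Pre_xor_encode plain avoid) := by
  unfold Pre_xor_encode; infer_instance

def pvWitness_xor_encode : String × List Int := ("A", [65])

def Spec_xor_encode (plain : String) (avoid : List Int) (out : String × String) : Prop := out = xor_encode_alt plain avoid
instance (plain : String) (avoid : List Int) (out : String × String) : Decidable (Spec_xor_encode plain avoid out) := by unfold Spec_xor_encode; infer_instance

-- ===== CLAIM (what is proved, stated in full; the proofs are below) =====
def Claim_equal_xor_encode : Prop := ∀ (plain : String) (avoid : List Int), Dom_xor_encode plain avoid → Pre_xor_encode plain avoid → Spec_xor_encode plain avoid (xor_encode plain avoid)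

-- ===== LEMMAS AND PROOFS =====

-- Pre_ (a Bool test) restated as the bounded quantifier the proofs use
theorem pvPre_elim {plain : String} {avoid : List Int} (hpre : Pre_xor_encode plain avoid) :
    ∀ c ∈ plain.toList, (((c.toNat : Int)) ∈ avoid ∨ (0 : Int) ∈ avoid) →
      ∃ k ∈ List.range 256, ((k : Int)) ∉ avoid ∧ ((↑(c.toNat ^^^ k) : Int)) ∉ avoid := by
  intro c hc h
  have hb := List.all_eq_true.mp hpre c hc
  rw [Bool.or_eq_true] at hb
  rcases hb with hb | hb
  · exfalso
    simp at hb
    tauto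
  · obtain ⟨k, hk, hp⟩ := List.any_eq_true.mp hb
    refine ⟨k, hk, ?_⟩
    simpa using hp

-- the per-character encoder B applies (table already looked up / inlined)
def pvG (avoid : List Int) (c : Char) : Char × Char :=
  if avoid.contains (Int.ofNat c.toNat) || avoid.contains 0 then
    match (List.range 256).find? (fun k =>
        !(avoid.contains (Int.ofNat k)) && !(avoid.contains (Int.ofNat (c.toNat ^^^ k)))) with
    | none => (c, Char.ofNat 0)
    | some k => (Char.ofNat (c.toNat ^^^ k), Char.ofNat k)
  else (c, Char.ofNat 0)

-- B's table lookup at a byte value v < 256 equals the inlined per-byte encoder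
theorem pvTable_lookup (avoid : List Int) (c : Char) (hc : c.toNat < 256) :
    (((List.range 256).map (fun v =>
      if PySem.Set.contains (PySem.Set.ofList avoid) (Int.ofNat v) || PySem.Set.contains (PySem.Set.ofList avoid) 0 then
        some ((List.range 256).find? (fun k =>
          !(PySem.Set.contains (PySem.Set.ofList avoid) (Int.ofNat k)) && !(PySem.Set.contains (PySem.Set.ofList avoid) (Int.ofNat (v ^^^ k)))))
      else none)).getD c.toNat none) =
    (if avoid.contains (Int.ofNat c.toNat) || avoid.contains 0 then
      some ((List.range 256).find? (fun k =>
        !(avoid.contains (Int.ofNat k)) && !(avoid.contains (Int.ofNat (c.toNat ^^^ k)))))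
    else none) := by
  rw [List.getD_eq_getElem?_getD]
  simp [hc, PySem.Set.contains, PySem.Set.mem_ofList]

-- B's result, characterised as a map of pvG
theorem pvAlt_eq_map (plain : String) (avoid : List Int)
    (hd : ∀ c ∈ plain.toList, c.toNat < 256) :
    xor_encode_alt plain avoid =
      (String.ofList ((plain.toList.map (pvG avoid)).map Prod.fst),
       String.ofList ((plain.toList.map (pvG avoid)).map Prod.snd)) := by
  unfold xor_encode_alt
  have hmap : ∀ c ∈ plain.toList,
      (match (((List.range 256).map (fun v =>
        if PySem.Set.contains (PySem.Set.ofList avoid) (Int.ofNat v) || PySem.Set.contains (PySem.Set.ofList avoid) 0 then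
          some ((List.range 256).find? (fun k =>
            !(PySem.Set.contains (PySem.Set.ofList avoid) (Int.ofNat k)) && !(PySem.Set.contains (PySem.Set.ofList avoid) (Int.ofNat (v ^^^ k)))))
        else none)).getD c.toNat none) with
       | none => (c, Char.ofNat 0)
       | some none => (c, Char.ofNat 0)
       | some (some k) => (Char.ofNat (c.toNat ^^^ k), Char.ofNat k)) = pvG avoid c := by
    intro c hc
    rw [pvTable_lookup avoid c (hd c hc)]
    unfold pvG
    by_cases h : (((c.toNat : Int)) ∈ avoid ∨ (0 : Int) ∈ avoid)
    · have hb : (avoid.contains (Int.ofNat c.toNat) || avoid.contains 0) = true := by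
        simpa using h
      rw [if_pos hb, if_pos hb]
      cases (List.range 256).find? (fun k =>
        !(avoid.contains (Int.ofNat k)) && !(avoid.contains (Int.ofNat (c.toNat ^^^ k)))) <;>
        simp
    · have hb : ¬ ((avoid.contains (Int.ofNat c.toNat) || avoid.contains 0) = true) := by
        simpa using h
      rw [if_neg hb, if_neg hb]
  simp only []
  rw [List.map_congr_left hmap]

-- A's step on one character equals pvG, under Pre_'s guarantee for that character
theorem pvStep_eq (avoid : List Int) (c : Char) (st : String × String)
    (hpre : (((c.toNat : Int)) ∈ avoid ∨ (0 : Int) ∈ avoid) →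
      ∃ k ∈ List.range 256, ((k : Int)) ∉ avoid ∧ ((↑(c.toNat ^^^ k) : Int)) ∉ avoid) :
    (let p : Int := Int.ofNat c.toNat
     if avoid.contains p || avoid.contains 0 then
      match (PySem.List.pyRange 0 256 1).find?
          (fun key => !(avoid.contains key || avoid.contains (Int.ofNat (p.toNat ^^^ key.toNat)))) with
      | some key => (st.1.push (Char.ofNat (p.toNat ^^^ key.toNat)), st.2.push (Char.ofNat key.toNat))
      | none => st
     else
      (st.1.push c, st.2.push (Char.ofNat 0))) =
    (st.1.push (pvG avoid c).1, st.2.push (pvG avoid c).2) := by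
  unfold pvG
  by_cases hb : (avoid.contains (Int.ofNat c.toNat) || avoid.contains 0) = true
  · -- the character needs encoding; Pre_ provides a usable key
    have h : (((c.toNat : Int)) ∈ avoid ∨ (0 : Int) ∈ avoid) := by simpa using hb
    obtain ⟨k, hk256, hk1, hk2⟩ := hpre h
    have hsome : ((List.range 256).find? (fun k =>
        !(avoid.contains (Int.ofNat k)) && !(avoid.contains (Int.ofNat (c.toNat ^^^ k))))).isSome := by
      rw [List.find?_isSome]
      refine ⟨k, hk256, ?_⟩
      simpa using ⟨hk1, hk2⟩
    obtain ⟨k0, hfind⟩ := Option.isSome_iff_exists.mp hsome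
    have hrange : PySem.List.pyRange 0 256 1 = (List.range 256).map (fun k : Nat => (k : Int)) := by
      rw [PySem.List.pyRange_one]
      simp
    have hA : ((PySem.List.pyRange 0 256 1).find?
        (fun key => !(avoid.contains key ||
          avoid.contains (Int.ofNat ((Int.ofNat c.toNat).toNat ^^^ key.toNat))))) =
        Option.map (fun k : Nat => (k : Int)) ((List.range 256).find? (fun k =>
          !(avoid.contains (Int.ofNat k)) && !(avoid.contains (Int.ofNat (c.toNat ^^^ k))))) := by
      rw [hrange, List.find?_map]
      have hfun : ((fun key => !(avoid.contains key ||
            avoid.contains (Int.ofNat ((Int.ofNat c.toNat).toNat ^^^ key.toNat)))) ∘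
          (fun k : Nat => (k : Int))) = (fun k =>
            !(avoid.contains (Int.ofNat k)) && !(avoid.contains (Int.ofNat (c.toNat ^^^ k)))) := by
        funext k
        simp [Function.comp, Bool.not_or]
      rw [hfun]
    rw [if_pos hb, if_pos hb, hA, hfind]
    simp
  · rw [if_neg hb, if_neg hb]

-- the fold of A, rewritten as appending the mapped characters
theorem pvFold_eq (avoid : List Int) (l : List Char) (s1 s2 : String)
    (hpre : ∀ c ∈ l, (((c.toNat : Int)) ∈ avoid ∨ (0 : Int) ∈ avoid) →
      ∃ k ∈ List.range 256, ((k : Int)) ∉ avoid ∧ ((↑(c.toNat ^^^ k) : Int)) ∉ avoid) :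
    l.foldl (fun st char =>
      let p : Int := Int.ofNat char.toNat
      if avoid.contains p || avoid.contains 0 then
        match (PySem.List.pyRange 0 256 1).find?
            (fun key => !(avoid.contains key || avoid.contains (Int.ofNat (p.toNat ^^^ key.toNat)))) with
        | some key => (st.1.push (Char.ofNat (p.toNat ^^^ key.toNat)), st.2.push (Char.ofNat key.toNat))
        | none => st
      else
        (st.1.push char, st.2.push (Char.ofNat 0))) (s1, s2) =
    (s1 ++ String.ofList ((l.map (pvG avoid)).map Prod.fst),
     s2 ++ String.ofList ((l.map (pvG avoid)).map Prod.snd)) := by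
  induction l generalizing s1 s2 with
  | nil => simp
  | cons c rest ih =>
    have hstep := pvStep_eq avoid c (s1, s2) (hpre c (by simp))
    simp only [List.foldl_cons]
    rw [hstep, ih _ _ (fun c' h' hx => hpre c' (by simp [h']) hx)]
    have hps : ∀ (s : String) (a : Char) (cs : List Char),
        s.push a ++ String.ofList cs = s ++ String.ofList (a :: cs) :=
      fun s a cs => String.toList_inj.mp (by simp)
    simp only [List.map_cons, hps]

-- ===== VERDICT (by name: the statement is the Claim_ definition above) =====
theorem xor_encode_spec : Claim_equal_xor_encode := by
  intro plain avoid hdom hpre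
  unfold Spec_xor_encode
  have hd : ∀ c ∈ plain.toList, c.toNat < 256 := by
    unfold Dom_xor_encode pvDomStr at hdom
    rw [Bool.and_eq_true, List.all_eq_true] at hdom
    intro c hc
    have := hdom.1 c hc
    simp [pvDomChar] at this
    omega
  rw [pvAlt_eq_map plain avoid hd]
  unfold xor_encode
  rw [pvFold_eq avoid plain.toList "" "" (pvPre_elim hpre)]
  simp
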